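-- pv_equiv track=rewrite | github.com/Uneithem/FIPS-140-Randomness-Check | main.py | MaxBitLen
-- ===== SOURCE A (Python) =====
-- def MaxBitLen(s):
--     s_ones = s.split('0')
--     s_zeros = s.split('1')
--     for i in range(len(s_ones)):
--         if len(s_ones[i]) > 36:
--             return False
--     for i in range(len(s_zeros)):
--         if len(s_zeros[i]) > 36:
--             return False
--     return True
-- ===== SOURCE B (Python) =====
-- def MaxBitLen(s):
--     run_non0 = 0
--     run_non1 = 0
--     for c in s:
--         run_non0 = 0 if c == '0' else run_non0 + 1
--         if run_non0 > 36:
--             return False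
--         run_non1 = 0 if c == '1' else run_non1 + 1
--         if run_non1 > 36:
--             return False
--     return True
-- ===== Notes on version B (the rewrite author's own statement) =====
-- stated objective: simpler
-- what changed: Replaces the two split-based chunk-list constructions plus index loops by one left-to-right pass over the characters maintaining two run-length counters (run of non-zero-chars, run of non-one-chars), with no intermediate lists.
import Mathlib
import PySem

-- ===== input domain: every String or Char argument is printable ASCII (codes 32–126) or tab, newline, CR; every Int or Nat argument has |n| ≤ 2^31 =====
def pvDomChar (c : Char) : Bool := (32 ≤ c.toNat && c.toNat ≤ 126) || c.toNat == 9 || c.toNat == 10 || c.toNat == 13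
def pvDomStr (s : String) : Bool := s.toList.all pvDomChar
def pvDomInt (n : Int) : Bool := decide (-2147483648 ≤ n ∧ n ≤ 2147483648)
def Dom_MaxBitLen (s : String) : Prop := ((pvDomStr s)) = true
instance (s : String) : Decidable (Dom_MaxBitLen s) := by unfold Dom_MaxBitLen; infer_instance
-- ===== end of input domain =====

-- B replaces the split('0')/split('1') chunk lists and index loops by one pass with two run counters (simpler, no intermediate lists).

-- ===== PORT A =====
-- the 'for i in range(len(chunks)): if len(chunks[i]) > 36: return False' loop
def aCheck (chunks : List (List Char)) : Bool :=
  match chunks with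
  | [] => true
  | c :: rest => if c.length > 36 then false else aCheck rest

-- s.split('0') with the nonempty literal separator '0' is exactly PySem.Chars.splitOn on the code points
def MaxBitLen (s : String) : Bool :=
  let s_ones := PySem.Chars.splitOn s.toList ['0']
  let s_zeros := PySem.Chars.splitOn s.toList ['1']
  if aCheck s_ones then (if aCheck s_zeros then true else false) else false

-- ===== PORT B =====
-- single pass, two run counters (run of non-'0' chars, run of non-'1' chars), early False on > 36
def bLoop (cs : List Char) (run_non0 run_non1 : Int) : Bool :=
  match cs with
  | [] => true
  | c :: rest =>
    let r0 := if c == '0' then 0 else run_non0 + 1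
    if r0 > 36 then false
    else
      let r1 := if c == '1' then 0 else run_non1 + 1
      if r1 > 36 then false
      else bLoop rest r0 r1

def MaxBitLen_alt (s : String) : Bool := bLoop s.toList 0 0

-- ===== PRECONDITION & SPEC =====
def Spec_MaxBitLen (s : String) (out : Bool) : Prop := out = MaxBitLen_alt s
instance (s : String) (out : Bool) : Decidable (Spec_MaxBitLen s out) := by unfold Spec_MaxBitLen; infer_instance

-- ===== CLAIM (what is proved, stated in full; the proofs are below) =====
def Claim_equal_MaxBitLen : Prop := ∀ (s : String), Dom_MaxBitLen s → Spec_MaxBitLen s (MaxBitLen s)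

-- ===== LEMMAS AND PROOFS =====

-- canonical spec: all runs of chars ≠ a have length ≤ 36, r = length of the current run
def runOk (a : Char) (l : List Char) (r : Nat) : Bool :=
  match l with
  | [] => decide (r ≤ 36)
  | c :: cs => if c == a then (decide (r ≤ 36)) && runOk a cs 0 else runOk a cs (r + 1)

-- early-exit form of runOk, Int counter, checks after each increment
def incOk (a : Char) (l : List Char) (r : Int) : Bool :=
  match l with
  | [] => true
  | c :: cs => if c == a then incOk a cs 0 else (if r + 1 > 36 then false else incOk a cs (r + 1))

theorem aCheck_eq_all (chunks : List (List Char)) :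
    aCheck chunks = chunks.all (fun c => decide (c.length ≤ 36)) := by
  induction chunks with
  | nil => rfl
  | cons c rest ih =>
    simp only [aCheck, List.all_cons, ih]
    by_cases h : c.length > 36
    · simp [h]
    · simp [h]; intro _; omega

theorem go_single (a : Char) (fuel : Nat) :
    ∀ (l cur : List Char) (acc : List (List Char)), l.length ≤ fuel →
      (PySem.Chars.splitOn.go [a] fuel l cur acc).all (fun c => decide (c.length ≤ 36)) =
        (acc.all (fun c => decide (c.length ≤ 36)) && runOk a l cur.length) := by
  induction fuel with
  | zero =>
    intro l cur acc h
    have : l = [] := List.length_eq_zero_iff.mp (Nat.le_zero.mp h)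
    subst this
    simp [PySem.Chars.splitOn.go, runOk, List.all_reverse, Bool.and_comm]
  | succ f ih =>
    intro l cur acc h
    cases l with
    | nil => simp [PySem.Chars.splitOn.go, runOk, List.all_reverse, Bool.and_comm]
    | cons c rest =>
      simp only [PySem.Chars.splitOn.go]
      by_cases hc : c = a
      · subst hc
        have hp : [c].isPrefixOf (c :: rest) = true := by simp [List.isPrefixOf]
        simp only [hp, if_pos]
        have hd : List.drop [c].length (c :: rest) = rest := by simp
        rw [hd, ih rest [] _ (by simpa using Nat.le_of_succ_le_succ h)]
        simp [runOk, Bool.and_assoc, Bool.and_comm]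
      · have hp : [a].isPrefixOf (c :: rest) = false := by
          simp [List.isPrefixOf]
          exact fun hh => (hc hh.symm).elim
        simp only [hp, Bool.false_eq_true, if_false]
        rw [ih rest (c :: cur) acc (by simpa using Nat.le_of_succ_le_succ h)]
        simp [runOk, hc]

theorem runOk_false_of_gt (a : Char) (l : List Char) :
    ∀ r : Nat, 36 < r → runOk a l r = false := by
  induction l with
  | nil => intro r h; simp [runOk]; omega
  | cons c cs ih =>
    intro r h
    by_cases hc : c == a
    · simp [runOk, hc]; intro h'; omega
    · simp [runOk, hc]; exact ih (r + 1) (by omega)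

theorem runOk_eq_incOk (a : Char) (l : List Char) :
    ∀ r : Nat, r ≤ 36 → runOk a l r = incOk a l (r : Int) := by
  induction l with
  | nil => intro r h; simp [runOk, incOk, h]
  | cons c cs ih =>
    intro r h
    by_cases hc : c == a
    · simp [runOk, incOk, hc, h]; exact ih 0 (by omega)
    · simp only [runOk, incOk, hc, Bool.false_eq_true, if_false]
      by_cases h' : r + 1 ≤ 36
      · rw [ih (r + 1) h']
        have : ¬ ((r : Int) + 1 > 36) := by omega
        simp [this]
      · have hr : r = 36 := by omega
        subst hr
        rw [runOk_false_of_gt a cs 37 (by omega)]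
        norm_num

theorem bLoop_eq_and (cs : List Char) :
    ∀ r0 r1 : Int, bLoop cs r0 r1 = (incOk '0' cs r0 && incOk '1' cs r1) := by
  induction cs with
  | nil => intro r0 r1; simp [bLoop, incOk]
  | cons c rest ih =>
    intro r0 r1
    by_cases h0 : c == '0' <;> by_cases h1 : c == '1'
    · exact absurd (by rw [eq_of_beq h0] at h1; exact eq_of_beq h1) (by decide)
    · -- c = '0': r0' = 0 ≤ 36
      simp only [bLoop, incOk, h0, h1, if_true, Bool.false_eq_true, if_false]
      have : ¬ ((0 : Int) > 36) := by omega
      simp only [this, if_false]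
      by_cases hb : r1 + 1 > 36
      · simp [hb]
      · simp [hb, ih]
    · -- c = '1': r1' = 0
      simp only [bLoop, incOk, h0, h1, if_true, Bool.false_eq_true, if_false]
      by_cases ha : r0 + 1 > 36
      · simp [ha]
      · have : ¬ ((0 : Int) > 36) := by omega
        simp [ha, this, ih]
    · simp only [bLoop, incOk, h0, h1, Bool.false_eq_true, if_false]
      by_cases ha : r0 + 1 > 36
      · simp [ha]
      · by_cases hb : r1 + 1 > 36
        · simp [ha, hb]
        · simp [ha, hb, ih]

theorem splitOn_check (a : Char) (l : List Char) :
    aCheck (PySem.Chars.splitOn l [a]) = incOk a l 0 := by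
  rw [aCheck_eq_all, PySem.Chars.splitOn,
    go_single a (l.length + 1) l [] [] (by omega)]
  simp [runOk_eq_incOk a l 0 (by omega)]

-- ===== VERDICT (by name: the statement is the Claim_ definition above) =====
theorem MaxBitLen_spec : Claim_equal_MaxBitLen := by
  intro s _
  unfold Spec_MaxBitLen MaxBitLen MaxBitLen_alt
  rw [bLoop_eq_and]
  simp only [splitOn_check]
  by_cases h0 : incOk '0' s.toList 0 <;> by_cases h1 : incOk '1' s.toList 0 <;>
    simp [h0, h1]
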